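-- pv_equiv track=rewrite | github.com/tdiprima/bolton-bits | src/performance_comparison.py | bad_bucketize
-- ===== SOURCE A (Python) =====
-- def bad_bucketize(data):
--     buckets = {}
--     for item in data:
--         key = item % 10
--         if key not in buckets:
--             buckets[key] = []
--         # BAD: creates a new list every time
--         buckets[key] = buckets[key] + [item]
--     return buckets
-- ===== SOURCE B (Python) =====
-- def bad_bucketize(data):
--     # Two-pass: distinct keys in first-occurrence order, then one filter pass per key.
--     keys = list(dict.fromkeys(item % 10 for item in data))
--     return {k: [item for item in data if item % 10 == k] for k in keys}
-- ===== Notes on version B (the rewrite author's own statement) =====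
-- stated objective: faster
-- what changed: Replaces the single dict-accumulating pass (which rebuilds each bucket with list concatenation, quadratic in bucket size) with a two-phase scheme: an ordered-dedup pass over the keys, then one linear filter comprehension per distinct key (at most 10).
import Mathlib
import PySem

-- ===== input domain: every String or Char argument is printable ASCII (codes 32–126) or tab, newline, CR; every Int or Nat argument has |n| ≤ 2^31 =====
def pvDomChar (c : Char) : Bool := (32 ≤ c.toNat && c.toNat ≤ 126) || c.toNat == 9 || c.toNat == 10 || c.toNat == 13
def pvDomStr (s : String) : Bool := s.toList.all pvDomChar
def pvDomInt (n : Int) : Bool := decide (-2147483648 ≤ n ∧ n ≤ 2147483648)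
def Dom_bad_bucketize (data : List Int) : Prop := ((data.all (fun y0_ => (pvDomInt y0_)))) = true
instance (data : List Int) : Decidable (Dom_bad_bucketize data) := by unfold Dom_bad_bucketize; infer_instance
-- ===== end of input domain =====

-- B replaces A's single dict-accumulating pass by an ordered-dedup of the keys followed by one filter pass per key (alternative decomposition, same results).


-- ===== PORT A =====
-- A: one pass; for each item, ensure bucket exists then rebuild it with list concatenation.
def bad_bucketize (data : List Int) : List (Int × List Int) :=
  (data.foldl (fun buckets item =>
      let key := PySem.Int.mod item 10
      let buckets := if buckets.contains key then buckets else buckets.insert key []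
      buckets.insert key (buckets.getD key [] ++ [item]))
    PySem.Dict.empty).items

-- ===== PORT B =====
-- B: distinct keys in first-occurrence order, then one filter pass per key.
def bad_bucketize_alt (data : List Int) : List (Int × List Int) :=
  (PySem.List.dedup (data.map (fun item => PySem.Int.mod item 10))).map
    (fun k => (k, data.filter (fun item => PySem.Int.mod item 10 == k)))

-- ===== PRECONDITION & SPEC =====
def Spec_bad_bucketize (data : List Int) (out : List (Int × List Int)) : Prop := out = bad_bucketize_alt data
instance (data : List Int) (out : List (Int × List Int)) : Decidable (Spec_bad_bucketize data out) := by unfold Spec_bad_bucketize; infer_instance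

-- ===== CLAIM (what is proved, stated in full; the proofs are below) =====
def Claim_equal_bad_bucketize : Prop := ∀ (data : List Int), Dom_bad_bucketize data → Spec_bad_bucketize data (bad_bucketize data)

-- ===== LEMMAS AND PROOFS =====



-- A's loop step is exactly a Dict.modify with default [] at the item's key.
theorem bb_step_eq_modify (d : PySem.Dict Int (List Int)) (item : Int) :
    (let key := PySem.Int.mod item 10
     let d' := if d.contains key then d else d.insert key []
     d'.insert key (d'.getD key [] ++ [item]))
    = d.modify (PySem.Int.mod item 10) [] (· ++ [item]) := by
  by_cases h : d.contains (PySem.Int.mod item 10) = true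
  · simp only [h, if_true, PySem.Dict.modify]
  · have h' : d.contains (PySem.Int.mod item 10) = false := by simpa using h
    simp only [h', Bool.false_eq_true, if_false, PySem.Dict.modify,
      PySem.Dict.getD_insert_self, PySem.Dict.insert_insert_self]
    rw [PySem.Dict.getD_of_not_contains _ _ h']

theorem bb_main (data : List Int) : bad_bucketize data = bad_bucketize_alt data := by
  unfold bad_bucketize bad_bucketize_alt
  have hfold : (data.foldl (fun buckets item =>
      let key := PySem.Int.mod item 10
      let buckets := if buckets.contains key then buckets else buckets.insert key []
      buckets.insert key (buckets.getD key [] ++ [item])) PySem.Dict.empty)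
      = (data.map (fun x => (PySem.Int.mod x 10, x))).foldl
          (fun d p => d.modify p.1 [] (· ++ [p.2])) PySem.Dict.empty := by
    rw [List.foldl_map]
    exact List.foldl_ext _ _ _ (fun d x _ => bb_step_eq_modify d x)
  rw [hfold]
  set L := data.map (fun x => (PySem.Int.mod x 10, x)) with hL
  set D := L.foldl (fun d p => d.modify p.1 [] (· ++ [p.2])) PySem.Dict.empty with hD
  have hnd : D.keys.Nodup := by
    rw [hD]
    exact PySem.Dict.nodup_keys_foldl_modify_key L Prod.fst [] _ _
      (by simp [PySem.Dict.keys_empty])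
  have hkeys : D.keys = PySem.List.dedup (data.map (fun item => PySem.Int.mod item 10)) := by
    rw [hD, PySem.Dict.keys_foldl_modify_key]
    simp [PySem.Dict.keys_empty, hL, PySem.Set.update, PySem.Set.ofList_eq_foldl,
      List.foldl_map]
  have hget : ∀ k, D.getD k [] = data.filter (fun item => PySem.Int.mod item 10 == k) := by
    intro k
    rw [hD, PySem.Dict.getD_foldl_modify_append, PySem.Dict.getD_empty]
    rw [hL, List.filter_map, List.map_map]
    simp [Function.comp_def]
  rw [PySem.Dict.items_eq_map_keys D hnd [], hkeys]
  exact List.map_congr_left (fun k _ => by rw [hget k])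

-- ===== VERDICT =====
theorem bad_bucketize_spec : Claim_equal_bad_bucketize := fun data _ => bb_main data
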